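-- pv_equiv track=rewrite | github.com/cleverkitty1310/Toptal_Test_Answers | problem_01.py | findTotalImbalance
-- ===== SOURCE A (Python) =====
-- def calcImbalance(sub):
--     res = 0
--     if len(sub) == 1:
--         return res
--     for i in range(1, len(sub)):
--         if sub[i] - sub[i - 1] > 1:
--             res += 1
--     return res
--
-- def findTotalImbalance(rank):
--     res = 0
--     n = len(rank)
--     for i in range(n - 1):
--         for j in range(i + 2, n + 1):
--             sub = rank[i:j]
--             sub = sorted(sub)
--             res += calcImbalance(sub)
--     return res
-- ===== SOURCE B (Python) =====
-- def findTotalImbalance(rank):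
--     # For each left endpoint, grow the subarray rightward, keeping it as a
--     # sorted list and updating the imbalance incrementally from the inserted
--     # element's neighbours, instead of re-sorting and re-scanning every subarray.
--     total = 0
--     for i in range(len(rank)):
--         s = [rank[i]]
--         imb = 0
--         for x in rank[i + 1:]:
--             p = 0
--             while p < len(s) and s[p] <= x:
--                 p += 1
--             if 0 < p < len(s) and s[p] - s[p - 1] > 1:
--                 imb -= 1
--             if 0 < p and x - s[p - 1] > 1:
--                 imb += 1
--             if p < len(s) and s[p] - x > 1:
--                 imb += 1
--             s.insert(p, x)
--             total += imb
--     return total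
-- ===== Notes on version B (the rewrite author's own statement) =====
-- stated objective: faster
-- what changed: Instead of sorting and rescanning every subarray, B fixes the left endpoint and grows the subarray rightward, maintaining it as a sorted list into which each new element is inserted, updating the imbalance in O(1) from the inserted element's two neighbours.
import Mathlib
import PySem

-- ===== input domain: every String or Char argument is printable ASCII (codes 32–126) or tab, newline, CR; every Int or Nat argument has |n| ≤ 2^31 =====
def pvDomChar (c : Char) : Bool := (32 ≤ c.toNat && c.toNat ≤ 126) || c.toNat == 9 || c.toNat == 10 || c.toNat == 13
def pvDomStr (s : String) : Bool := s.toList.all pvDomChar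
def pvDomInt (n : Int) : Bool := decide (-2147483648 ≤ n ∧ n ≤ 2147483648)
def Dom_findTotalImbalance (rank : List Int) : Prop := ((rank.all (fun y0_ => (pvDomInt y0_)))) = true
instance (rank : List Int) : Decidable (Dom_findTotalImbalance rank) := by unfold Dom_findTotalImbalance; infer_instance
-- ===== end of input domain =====

-- B replaces A's sort-and-rescan of every subarray by growing each subarray rightward in a
-- maintained sorted list, updating the imbalance from the inserted element's neighbours (faster).

-- ===== PORT A =====
def calcImbalance (sub : List Int) : Int :=
  let res : Int := 0
  if sub.length = 1 then res
  else
    (PySem.List.pyRange 1 (sub.length : Int) 1).foldl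
      (fun res i =>
        if PySem.List.pyGetD sub i 0 - PySem.List.pyGetD sub (i - 1) 0 > 1 then res + 1 else res)
      res

def findTotalImbalance (rank : List Int) : Int :=
  let n : Int := rank.length
  (PySem.List.pyRange 0 (n - 1) 1).foldl
    (fun res i =>
      (PySem.List.pyRange (i + 2) (n + 1) 1).foldl
        (fun res j =>
          res + calcImbalance (PySem.List.sorted (PySem.List.slice rank (some i) (some j)) (fun x => x) false))
        res)
    0

-- ===== PORT B =====
-- the scan 'p = 0; while p < len(s) and s[p] <= x: p += 1'
def pvInsPos (s : List Int) (x : Int) : Nat :=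
  match s with
  | [] => 0
  | a :: t => if a ≤ x then pvInsPos t x + 1 else 0

-- one inner-loop iteration: neighbour-delta update of imb, then s.insert(p, x)
def pvStep (s : List Int) (imb : Int) (x : Int) : List Int × Int :=
  let p := pvInsPos s x
  let imb := if 0 < p ∧ p < s.length ∧ PySem.List.pyGetD s (p : Int) 0 - PySem.List.pyGetD s ((p : Int) - 1) 0 > 1 then imb - 1 else imb
  let imb := if 0 < p ∧ x - PySem.List.pyGetD s ((p : Int) - 1) 0 > 1 then imb + 1 else imb
  let imb := if p < s.length ∧ PySem.List.pyGetD s (p : Int) 0 - x > 1 then imb + 1 else imb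
  (PySem.List.insert s (p : Int) x, imb)

-- 'for x in rank[i+1:]': add the running imbalance to the total after each insertion
def pvInner : List Int → List Int → Int → Int
  | [], _, _ => 0
  | x :: xs, s, imb =>
    let r := pvStep s imb x
    r.2 + pvInner xs r.1 r.2

-- outer loop over left endpoints, as recursion on the suffixes of rank
def findTotalImbalance_alt : List Int → Int
  | [] => 0
  | v :: rest => pvInner rest [v] 0 + findTotalImbalance_alt rest

-- ===== PRECONDITION & SPEC =====
def Spec_findTotalImbalance (rank : List Int) (out : Int) : Prop := out = findTotalImbalance_alt rank
instance (rank : List Int) (out : Int) : Decidable (Spec_findTotalImbalance rank out) := by unfold Spec_findTotalImbalance; infer_instance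

-- ===== CLAIM (what is proved, stated in full; the proofs are below) =====
def Claim_equal_findTotalImbalance : Prop := ∀ (rank : List Int), Dom_findTotalImbalance rank → Spec_findTotalImbalance rank (findTotalImbalance rank)

-- ===== LEMMAS AND PROOFS =====

-- 0/1 contribution of one adjacent pair
def pvGap (a b : Int) : Int := if b - a > 1 then 1 else 0

-- imbalance of a list: number of adjacent pairs with gap > 1
def pvImb : List Int → Int
  | [] => 0
  | [_] => 0
  | a :: b :: t => pvGap a b + pvImb (b :: t)

-- ordered insertion after equal elements (what bisect-style insertion does)
def pvIns (x : Int) : List Int → List Int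
  | [] => [x]
  | a :: t => if a ≤ x then a :: pvIns x t else x :: a :: t

def pvSrt (l : List Int) : List Int := l.foldl (fun acc x => pvIns x acc) []

-- the running sums B produces for one left endpoint
def pvPrefSum (s : List Int) : List Int → Int
  | [] => 0
  | x :: xs => pvImb (pvIns x s) + pvPrefSum (pvIns x s) xs

-- common middle form of both programs
def pvAux : List Int → Int
  | [] => 0
  | v :: rest => pvPrefSum [v] rest + pvAux rest

-- the neighbour delta B computes, over Nat-indexed getD
def pvDelta (s : List Int) (x : Int) : Int :=
  let p := pvInsPos s x
  (if 0 < p ∧ p < s.length ∧ s.getD p 0 - s.getD (p - 1) 0 > 1 then (-1 : Int) else 0)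
  + (if 0 < p ∧ x - s.getD (p - 1) 0 > 1 then 1 else 0)
  + (if p < s.length ∧ s.getD p 0 - x > 1 then 1 else 0)

theorem pvIns_eq_insertBy (s : List Int) (x : Int) :
    PySem.List.insertBy (fun a b => decide (a < b)) x s = pvIns x s := by
  induction s with
  | nil => rfl
  | cons a t ih =>
    simp only [PySem.List.insertBy, pvIns]
    by_cases h : a ≤ x
    · simp [h, not_lt.mpr h, ih]
    · simp [h, lt_of_not_ge h]

theorem pvSrt_eq (l : List Int) : PySem.List.sorted l (fun x => x) false = pvSrt l := by
  rw [PySem.List.sorted_eq_foldl_insertBy, pvSrt]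
  exact PySem.List.foldl_congr_mem l _ _ [] (fun acc x _ => pvIns_eq_insertBy acc x)

theorem pvGetD_append_lt (l : List Int) (y : Int) (i : Int) (h0 : 0 ≤ i) (h1 : i < (l.length : Int)) :
    PySem.List.pyGetD (l ++ [y]) i 0 = PySem.List.pyGetD l i 0 := by
  have hi : i.toNat < l.length := by omega
  rw [PySem.List.pyGetD_eq_getElem _ _ h0 (by simp; omega),
      PySem.List.pyGetD_eq_getElem _ _ h0 (by exact_mod_cast h1)]
  exact List.getElem_append_left hi

theorem pvImb_append (l : List Int) (y : Int) (h : l ≠ []) :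
    pvImb (l ++ [y]) = pvImb l + pvGap (l.getD (l.length - 1) 0) y := by
  induction l with
  | nil => exact absurd rfl h
  | cons a t ih =>
    rcases t with _ | ⟨b, t'⟩
    · simp [pvImb, pvGap]
    · have := ih (by simp)
      simp only [List.cons_append, pvImb] at this ⊢
      rw [this, add_assoc]
      congr 2

theorem pvCalcFold (l : List Int) : ∀ (res : Int),
    (PySem.List.pyRange 1 (l.length : Int) 1).foldl
      (fun res i =>
        if PySem.List.pyGetD l i 0 - PySem.List.pyGetD l (i - 1) 0 > 1 then res + 1 else res)
      res = res + pvImb l := by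
  induction l using List.reverseRecOn with
  | nil => intro res; simp [PySem.List.pyRange_one_eq_nil, pvImb]
  | append_singleton l y ih =>
    intro res
    rcases eq_or_ne l [] with rfl | hl
    · simp [PySem.List.pyRange_one_eq_nil, pvImb]
    · have hL : 1 ≤ (l.length : Int) := by
        have : l.length ≠ 0 := by simpa using hl
        omega
      have hlen : (((l ++ [y]).length : Nat) : Int) = (l.length : Int) + 1 := by
        simp
      rw [hlen, PySem.List.pyRange_one_succ_right hL, List.foldl_append]
      have hcong :
          (PySem.List.pyRange 1 (l.length : Int) 1).foldl
            (fun res i =>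
              if PySem.List.pyGetD (l ++ [y]) i 0 - PySem.List.pyGetD (l ++ [y]) (i - 1) 0 > 1 then res + 1 else res)
            res
          = (PySem.List.pyRange 1 (l.length : Int) 1).foldl
            (fun res i =>
              if PySem.List.pyGetD l i 0 - PySem.List.pyGetD l (i - 1) 0 > 1 then res + 1 else res)
            res := by
        apply PySem.List.foldl_congr_mem
        intro acc i hi
        have hmem := (PySem.List.mem_pyRange_one).1 hi
        rw [pvGetD_append_lt l y i (by omega) (by omega),
            pvGetD_append_lt l y (i - 1) (by omega) (by omega)]
      rw [hcong, ih res]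
      have hy : PySem.List.pyGetD (l ++ [y]) (l.length : Int) 0 = y := by
        rw [PySem.List.pyGetD_eq_getElem _ _ (by positivity) (by simp)]
        exact List.getElem_concat_length (by simp) _
      have hlast : PySem.List.pyGetD (l ++ [y]) ((l.length : Int) - 1) 0 = l.getD (l.length - 1) 0 := by
        rw [pvGetD_append_lt l y _ (by omega) (by omega),
            PySem.List.pyGetD_eq_getElem _ _ (by omega) (by omega)]
        have h1 : ((l.length : Int) - 1).toNat = l.length - 1 := by omega
        simp only [h1]
        rw [List.getD_eq_getElem l 0 (by omega)]
      simp only [List.foldl_cons, List.foldl_nil, hy, hlast]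
      rw [pvImb_append l y hl]
      unfold pvGap
      split_ifs <;> ring

theorem pvCalc_eq (l : List Int) : calcImbalance l = pvImb l := by
  unfold calcImbalance
  rcases l with _ | ⟨a, t⟩
  · simp [PySem.List.pyRange_one_eq_nil, pvImb]
  · rcases t with _ | ⟨b, t'⟩
    · simp [pvImb]
    · rw [if_neg (by simp : ¬ ((a :: b :: t').length = 1)), pvCalcFold]
      ring

theorem pvInsPos_le (s : List Int) (x : Int) : pvInsPos s x ≤ s.length := by
  induction s with
  | nil => simp [pvInsPos]
  | cons a t ih => simp only [pvInsPos, List.length_cons]; split <;> omega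

theorem pvIns_eq_take_drop (s : List Int) (x : Int) :
    pvIns x s = s.take (pvInsPos s x) ++ x :: s.drop (pvInsPos s x) := by
  induction s with
  | nil => rfl
  | cons a t ih =>
    simp only [pvIns, pvInsPos]
    split
    · simp [ih]
    · simp

theorem pvStep_fst (s : List Int) (imb x : Int) : (pvStep s imb x).1 = pvIns x s := by
  show PySem.List.insert s ((pvInsPos s x : Nat) : Int) x = pvIns x s
  rw [PySem.List.insert_natCast s _ x (pvInsPos_le s x), pvIns_eq_take_drop]

theorem pvStep_snd (s : List Int) (imb x : Int) : (pvStep s imb x).2 = imb + pvDelta s x := by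
  simp only [pvStep, pvDelta]
  rcases Nat.eq_zero_or_pos (pvInsPos s x) with h0 | h0
  · simp [h0, PySem.List.pyGetD_zero, List.getD]
    split_ifs <;> ring
  · have h1 : ((pvInsPos s x : Nat) : Int) - 1 = ((pvInsPos s x - 1 : Nat) : Int) := by omega
    rw [h1]
    simp only [PySem.List.pyGetD_natCast]
    split_ifs <;> ring

theorem pvDelta_spec (s : List Int) (x : Int) : pvImb (pvIns x s) = pvImb s + pvDelta s x := by
  induction s with
  | nil => simp [pvIns, pvImb, pvDelta, pvInsPos]
  | cons a t ih =>
    by_cases hax : a ≤ x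
    · rcases t with _ | ⟨b, t'⟩
      · simp only [pvIns, if_pos hax, pvImb, pvDelta, pvInsPos, pvGap]
        simp only [List.length_cons, List.length_nil, List.getD]
        split_ifs
        all_goals simp_all
        all_goals omega
      · by_cases hbx : b ≤ x
        · have hins : pvIns x (b :: t') = b :: pvIns x t' := by simp [pvIns, hbx]
          have hL : pvImb (pvIns x (a :: b :: t')) = pvGap a b + pvImb (pvIns x (b :: t')) := by
            rw [show pvIns x (a :: b :: t') = a :: b :: pvIns x t' from by
              simp [pvIns, hax, hbx], hins]
            rfl
          have hR : pvImb (a :: b :: t') = pvGap a b + pvImb (b :: t') := rfl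
          have hD : pvDelta (a :: b :: t') x = pvDelta (b :: t') x := by
            simp only [pvDelta, pvInsPos, if_pos hax, if_pos hbx, List.length_cons,
              Nat.add_sub_cancel, List.getD_cons_succ]
            split_ifs <;> omega
          rw [hL, ih, hR, hD]; ring
        · simp only [pvIns, if_pos hax, if_neg hbx, pvImb, pvDelta, pvInsPos,
            List.length_cons, Nat.add_sub_cancel, List.getD_cons_succ, List.getD_cons_zero, pvGap]
          split_ifs <;> simp_all <;> omega
    · simp only [pvIns, if_neg hax, pvImb, pvDelta, pvInsPos, pvGap]
      rcases t with _ | ⟨b, t'⟩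
      · simp only [List.length_cons, List.length_nil, List.getD]
        split_ifs <;> simp_all <;> omega
      · simp only [List.length_cons, List.getD]
        split_ifs <;> simp_all <;> omega

theorem pvInner_eq (xs : List Int) : ∀ (s : List Int) (imb : Int), imb = pvImb s →
    pvInner xs s imb = pvPrefSum s xs := by
  induction xs with
  | nil => intro s imb _; rfl
  | cons x xs ih =>
    intro s imb h
    have h2 : (pvStep s imb x).2 = pvImb (pvIns x s) := by
      rw [pvStep_snd, h, pvDelta_spec]
    show (pvStep s imb x).2 + pvInner xs (pvStep s imb x).1 (pvStep s imb x).2 = _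
    rw [pvStep_fst, h2, ih (pvIns x s) _ rfl]
    rfl

theorem pvAlt_eq (l : List Int) : findTotalImbalance_alt l = pvAux l := by
  induction l with
  | nil => rfl
  | cons v rest ih =>
    show pvInner rest [v] 0 + findTotalImbalance_alt rest = _
    rw [ih, pvInner_eq rest [v] 0 rfl]
    rfl

-- A-side sum forms
def pvInnerSum (xs : List Int) (i : Int) : Int :=
  ((PySem.List.pyRange (i + 2) ((xs.length : Int) + 1) 1).map
    (fun j => pvImb (pvSrt (PySem.List.slice xs (some i) (some j))))).sum

theorem pvA_sum (rank : List Int) :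
    findTotalImbalance rank =
      ((PySem.List.pyRange 0 ((rank.length : Int) - 1) 1).map (fun i => pvInnerSum rank i)).sum := by
  unfold findTotalImbalance pvInnerSum
  simp only [pvCalc_eq, pvSrt_eq, PySem.List.foldl_add, zero_add]

theorem pvPref_lemma (xs : List Int) : ∀ (s : List Int),
    ((List.range xs.length).map
      (fun m => pvImb ((xs.take (m + 1)).foldl (fun acc x => pvIns x acc) s))).sum
    = pvPrefSum s xs := by
  induction xs with
  | nil => intro s; rfl
  | cons x xs ih =>
    intro s
    rw [List.length_cons, List.range_succ_eq_map, List.map_cons, List.map_map]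
    show pvImb (pvIns x s) + _ = _
    rw [pvPrefSum]
    congr 1
    rw [← ih (pvIns x s)]
    apply congrArg
    apply List.map_congr_left
    intro m _
    simp [Function.comp, List.take_succ_cons]

-- Nat-indexed inner sum, and the chain down to pvAux
def pvInnerSumN (xs : List Int) (i : Nat) : Int :=
  ((List.range (xs.length - i - 1)).map (fun k => pvImb (pvSrt ((xs.drop i).take (k + 2))))).sum

theorem pvInnerSumN_eq (xs : List Int) (i : Nat) : pvInnerSum xs (i : Int) = pvInnerSumN xs i := by
  unfold pvInnerSum pvInnerSumN
  rw [PySem.List.pyRange_one, List.map_map]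
  have hn : ((xs.length : Int) + 1 - ((i : Int) + 2)).toNat = xs.length - i - 1 := by omega
  rw [hn]
  apply congrArg
  apply List.map_congr_left
  intro k _
  have hcast : (i : Int) + 2 + (k : Int) = ((i + 2 + k : Nat) : Int) := by push_cast; ring
  simp only [Function.comp_apply, hcast]
  rw [show ((i : Int)) = ((i : Nat) : Int) from rfl, PySem.List.slice_natCast]
  have h2 : i + 2 + k - i = k + 2 := by omega
  rw [h2]

theorem pvShiftN (v : Int) (rest : List Int) (i : Nat) :
    pvInnerSumN (v :: rest) (i + 1) = pvInnerSumN rest i := by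
  unfold pvInnerSumN
  simp [List.drop_succ_cons]

theorem pvHeadN (v : Int) (rest : List Int) :
    pvInnerSumN (v :: rest) 0 = pvPrefSum [v] rest := by
  unfold pvInnerSumN
  rw [← pvPref_lemma rest [v]]
  simp only [List.drop_zero, List.length_cons, Nat.add_sub_cancel, Nat.sub_zero]
  apply congrArg
  apply List.map_congr_left
  intro k _
  have h1 : (v :: rest).take (k + 2) = v :: rest.take (k + 1) := rfl
  rw [h1]
  rfl

theorem pvSumN (xs : List Int) :
    ((List.range (xs.length - 1)).map (fun i => pvInnerSumN xs i)).sum = pvAux xs := by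
  induction xs with
  | nil => rfl
  | cons v rest ih =>
    rcases rest with _ | ⟨b, t⟩
    · simp [pvInnerSumN, pvAux, pvPrefSum]
    · rw [List.length_cons, Nat.add_sub_cancel, List.length_cons, List.range_succ_eq_map,
        List.map_cons, List.map_map, List.sum_cons]
      rw [pvHeadN]
      show _ = pvAux (v :: b :: t)
      rw [pvAux]
      congr 1
      rw [← ih, List.length_cons, Nat.add_sub_cancel]
      apply congrArg
      apply List.map_congr_left
      intro i _
      simp only [Function.comp_apply, Nat.succ_eq_add_one]
      exact pvShiftN v (b :: t) i

theorem pvSum_eq_aux (xs : List Int) :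
    ((PySem.List.pyRange 0 ((xs.length : Int) - 1) 1).map (fun i => pvInnerSum xs i)).sum
      = pvAux xs := by
  rw [PySem.List.pyRange_one, List.map_map, ← pvSumN xs]
  have hn : ((xs.length : Int) - 1 - 0).toNat = xs.length - 1 := by omega
  rw [hn]
  apply congrArg
  apply List.map_congr_left
  intro k _
  simp only [Function.comp_apply, zero_add]
  exact pvInnerSumN_eq xs k

-- ===== VERDICT (by name: the statement is the Claim_ definition above) =====
theorem findTotalImbalance_spec : Claim_equal_findTotalImbalance := by
  intro rank _
  unfold Spec_findTotalImbalance
  rw [pvA_sum, pvSum_eq_aux, pvAlt_eq]
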